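-- pv_equiv track=rewrite | github.com/Gustyanda/git_practice | test - python/hackerrank/hackerrank_d4w3.py | data
-- ===== SOURCE A (Python) =====
-- def data(scores):
--     count_high = 0
--     highest_scores = scores[0]
--     count_low = 0
--     lowest_scores = scores[0]
--     for x in range(1,len(scores)):
--         if highest_scores < scores[x]:
--             highest_scores = scores[x]
--             count_high += 1
--     for y in range(1,len(scores)):
--         if lowest_scores > scores[y]:
--             lowest_scores = scores[y]
--             count_low += 1
--     return count_high,count_low
-- ===== SOURCE B (Python) =====
-- def data(scores):
--     # prefix-extremum characterisation: scores[i] is a new high/low record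
--     # exactly when it strictly beats the extremum of the whole prefix scores[:i]
--     n = len(scores)
--     count_high = sum(1 for i in range(1, n) if scores[i] > max(scores[:i]))
--     count_low = sum(1 for i in range(1, n) if scores[i] < min(scores[:i]))
--     return count_high, count_low
-- ===== Notes on version B (the rewrite author's own statement) =====
-- stated objective: alternative
-- what changed: Replaces A's stateful running-extreme loops by a stateless characterisation: for each index, compare scores[i] directly with max/min of the whole prefix scores[:i] and sum the indicators (O(n^2) comparisons instead of O(n) state updates).
import Mathlib
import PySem

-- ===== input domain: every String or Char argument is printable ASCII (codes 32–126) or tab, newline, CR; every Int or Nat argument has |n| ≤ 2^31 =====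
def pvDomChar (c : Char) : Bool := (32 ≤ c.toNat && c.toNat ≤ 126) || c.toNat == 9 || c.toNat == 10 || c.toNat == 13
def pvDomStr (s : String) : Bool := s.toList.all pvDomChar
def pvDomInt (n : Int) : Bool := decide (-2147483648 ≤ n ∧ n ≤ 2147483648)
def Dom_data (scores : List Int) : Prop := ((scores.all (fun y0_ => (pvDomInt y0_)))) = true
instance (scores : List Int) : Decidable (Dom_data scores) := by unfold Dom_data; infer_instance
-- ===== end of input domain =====

-- B replaces A's stateful running-extreme loops by a stateless prefix characterisation:
-- index i is counted iff scores[i] strictly beats max/min of the whole prefix scores[:i] (objective: alternative).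

-- ===== PORT A =====
-- A: the initial first-element access raises IndexError on the empty list; that input is excluded by
-- Pre_data, so the [] branch value below is never claimed about. Indexing scores[x] is always in range
-- in A's loops, so pyGetD's default is never used.
def data (scores : List Int) : Int × Int :=
  match scores with
  | [] => (0, 0)
  | s0 :: _ =>
    let hs := (PySem.List.pyRange 1 (PySem.List.len scores) 1).foldl
      (fun (st : Int × Int) x =>
        let v := PySem.List.pyGetD scores x 0
        if st.2 < v then (st.1 + 1, v) else st) (0, s0)
    let ls := (PySem.List.pyRange 1 (PySem.List.len scores) 1).foldl
      (fun (st : Int × Int) y =>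
        let v := PySem.List.pyGetD scores y 0
        if st.2 > v then (st.1 + 1, v) else st) (0, s0)
    (hs.1, ls.1)

-- ===== PORT B =====
-- B: sum of indicators over range(1, n); max(scores[:i]) / min(scores[:i]) are max?/min? of the slice
-- (the slice is nonempty for every i in the range, so the Option is always some).
def data_alt (scores : List Int) : Int × Int :=
  let n := PySem.List.len scores
  let ch := (PySem.List.pyRange 1 n 1).foldl
    (fun (c : Int) i =>
      if (PySem.List.max? (PySem.List.slice scores none (some i)) (fun y => y)).any
           (fun m => decide (m < PySem.List.pyGetD scores i 0)) then c + 1 else c) 0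
  let cl := (PySem.List.pyRange 1 n 1).foldl
    (fun (c : Int) i =>
      if (PySem.List.min? (PySem.List.slice scores none (some i)) (fun y => y)).any
           (fun m => decide (PySem.List.pyGetD scores i 0 < m)) then c + 1 else c) 0
  (ch, cl)

-- ===== PRECONDITION & SPEC =====
-- Pre_data excludes only the empty list, on which A raises IndexError at its initial first-element access.
def Pre_data (scores : List Int) : Prop := scores ≠ []
instance (scores : List Int) : Decidable (Pre_data scores) := by unfold Pre_data; infer_instance
def pvWitness_data : List Int := [3, 1, 4, 1, 5]

def Spec_data (scores : List Int) (out : Int × Int) : Prop := out = data_alt scores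
instance (scores : List Int) (out : Int × Int) : Decidable (Spec_data scores out) := by unfold Spec_data; infer_instance

-- ===== CLAIM (what is proved, stated in full; the proofs are below) =====
def Claim_equal_data : Prop := ∀ (scores : List Int), Dom_data scores → Pre_data scores → Spec_data scores (data scores)

-- ===== LEMMAS AND PROOFS =====

-- the common reference count: number of strict record highs (resp. lows) of t relative to the seed h
def recHigh (h : Int) : List Int → Int
  | [] => 0
  | x :: t => (if h < x then 1 else 0) + recHigh (max h x) t

def recLow (h : Int) : List Int → Int
  | [] => 0
  | x :: t => (if x < h then 1 else 0) + recLow (min h x) t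

-- A's running-max loop counts exactly recHigh (and tracks the running max)
theorem a_high (t : List Int) : ∀ (c h : Int),
    t.foldl (fun (st : Int × Int) v => if st.2 < v then (st.1 + 1, v) else st) (c, h)
      = (c + recHigh h t, t.foldl max h) := by
  induction t with
  | nil => intro c h; simp [recHigh]
  | cons x t ih =>
    intro c h
    by_cases hx : h < x
    · simp [recHigh, hx, ih, max_eq_right (le_of_lt hx), add_assoc]
    · simp [recHigh, hx, ih, max_eq_left (not_lt.mp hx)]

theorem a_low (t : List Int) : ∀ (c h : Int),
    t.foldl (fun (st : Int × Int) v => if st.2 > v then (st.1 + 1, v) else st) (c, h)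
      = (c + recLow h t, t.foldl min h) := by
  induction t with
  | nil => intro c h; simp [recLow]
  | cons x t ih =>
    intro c h
    by_cases hx : x < h
    · simp [recLow, hx, ih, min_eq_right (le_of_lt hx), add_assoc]
    · simp [recLow, hx, ih, min_eq_left (not_lt.mp hx)]

-- B's stateless prefix test, reduced to Nat indexing, also counts recHigh / recLow
theorem b_high (t : List Int) : ∀ (h c : Int),
    (List.range t.length).foldl
      (fun (c : Int) k => if (t.take k).foldl max h < t.getD k 0 then c + 1 else c) c
      = c + recHigh h t := by
  induction t with
  | nil => intro h c; simp [recHigh]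
  | cons x t ih =>
    intro h c
    rw [List.length_cons, List.range_succ_eq_map, List.foldl_cons, List.foldl_map]
    have hb : ∀ (c : Int) (k : Nat),
        (if ((x :: t).take k.succ).foldl max h < (x :: t).getD k.succ 0 then c + 1 else c)
          = (if (t.take k).foldl max (max h x) < t.getD k 0 then c + 1 else c) := by
      intro c k; simp [List.take_succ_cons]
    simp only [hb]
    rw [ih (max h x)]
    simp [recHigh]
    by_cases hx : h < x <;> simp [hx, add_assoc]

theorem b_low (t : List Int) : ∀ (h c : Int),
    (List.range t.length).foldl
      (fun (c : Int) k => if t.getD k 0 < (t.take k).foldl min h then c + 1 else c) c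
      = c + recLow h t := by
  induction t with
  | nil => intro h c; simp [recLow]
  | cons x t ih =>
    intro h c
    rw [List.length_cons, List.range_succ_eq_map, List.foldl_cons, List.foldl_map]
    have hb : ∀ (c : Int) (k : Nat),
        (if (x :: t).getD k.succ 0 < ((x :: t).take k.succ).foldl min h then c + 1 else c)
          = (if t.getD k 0 < (t.take k).foldl min (min h x) then c + 1 else c) := by
      intro c k; simp [List.take_succ_cons]
    simp only [hb]
    rw [ih (min h x)]
    simp [recLow]
    by_cases hx : x < h <;> simp [hx, add_assoc]

-- bridge: B's pyRange/slice/max? fold over scores = s0 :: rest is the Nat-index fold of b_high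
theorem bridge_high (s0 : Int) (rest : List Int) :
    (PySem.List.pyRange 1 (PySem.List.len (s0 :: rest)) 1).foldl
      (fun (c : Int) i =>
        if (PySem.List.max? (PySem.List.slice (s0 :: rest) none (some i)) (fun y => y)).any
             (fun m => decide (m < PySem.List.pyGetD (s0 :: rest) i 0)) then c + 1 else c) 0
      = recHigh s0 rest := by
  rw [PySem.List.pyRange_one, List.foldl_map]
  have hlen : ((PySem.List.len (s0 :: rest) - 1).toNat) = rest.length := by
    simp [PySem.List.len_eq]
  rw [hlen]
  have hb : ∀ (c : Int) (k : Nat),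
      (if (PySem.List.max? (PySem.List.slice (s0 :: rest) none (some (1 + (k : Int)))) (fun y => y)).any
            (fun m => decide (m < PySem.List.pyGetD (s0 :: rest) (1 + (k : Int)) 0)) then c + 1 else c)
        = (if (rest.take k).foldl max s0 < rest.getD k 0 then c + 1 else c) := by
    intro c k
    have h1 : (1 : Int) + (k : Int) = ((k + 1 : Nat) : Int) := by push_cast; ring
    rw [h1, PySem.List.slice_to _ (by positivity), PySem.List.pyGetD_natCast]
    simp [List.take_succ_cons, PySem.List.max?_id_cons, List.getD]
  simp only [hb]
  simpa using b_high rest s0 0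

theorem bridge_low (s0 : Int) (rest : List Int) :
    (PySem.List.pyRange 1 (PySem.List.len (s0 :: rest)) 1).foldl
      (fun (c : Int) i =>
        if (PySem.List.min? (PySem.List.slice (s0 :: rest) none (some i)) (fun y => y)).any
             (fun m => decide (PySem.List.pyGetD (s0 :: rest) i 0 < m)) then c + 1 else c) 0
      = recLow s0 rest := by
  rw [PySem.List.pyRange_one, List.foldl_map]
  have hlen : ((PySem.List.len (s0 :: rest) - 1).toNat) = rest.length := by
    simp [PySem.List.len_eq]
  rw [hlen]
  have hb : ∀ (c : Int) (k : Nat),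
      (if (PySem.List.min? (PySem.List.slice (s0 :: rest) none (some (1 + (k : Int)))) (fun y => y)).any
            (fun m => decide (PySem.List.pyGetD (s0 :: rest) (1 + (k : Int)) 0 < m)) then c + 1 else c)
        = (if rest.getD k 0 < (rest.take k).foldl min s0 then c + 1 else c) := by
    intro c k
    have h1 : (1 : Int) + (k : Int) = ((k + 1 : Nat) : Int) := by push_cast; ring
    rw [h1, PySem.List.slice_to _ (by positivity), PySem.List.pyGetD_natCast]
    simp [List.take_succ_cons, PySem.List.min?_id_cons, List.getD]
  simp only [hb]
  simpa using b_low rest s0 0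

-- A's index loops, through foldl_pyRange_pyGetD, are folds over the tail
theorem data_eq (s0 : Int) (rest : List Int) :
    data (s0 :: rest) = (recHigh s0 rest, recLow s0 rest) := by
  unfold data
  dsimp only
  have hA := PySem.List.foldl_pyRange_pyGetD (s0 :: rest) (0 : Int)
    (fun (st : Int × Int) v => if st.2 < v then (st.1 + 1, v) else st) ((0 : Int), s0)
    (a := 1) (le_of_lt Int.zero_lt_one)
  have hB := PySem.List.foldl_pyRange_pyGetD (s0 :: rest) (0 : Int)
    (fun (st : Int × Int) v => if st.2 > v then (st.1 + 1, v) else st) ((0 : Int), s0)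
    (a := 1) (le_of_lt Int.zero_lt_one)
  simp only [Int.toNat_one, List.drop_one, List.tail_cons] at hA hB
  rw [hA, hB, a_high, a_low]
  simp

theorem data_alt_eq (s0 : Int) (rest : List Int) :
    data_alt (s0 :: rest) = (recHigh s0 rest, recLow s0 rest) := by
  unfold data_alt
  dsimp only
  rw [bridge_high, bridge_low]

-- ===== VERDICT (by name: the statement is the Claim_ definition above) =====
theorem data_spec : Claim_equal_data := by
  intro scores _ hpre
  match scores, hpre with
  | s0 :: rest, _ =>
    show data (s0 :: rest) = data_alt (s0 :: rest)
    rw [data_eq, data_alt_eq]
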